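-- pv_equiv track=rewrite | github.com/Rohith20060521/python_programming | Day-2/noteselif.py | count
-- ===== SOURCE A (Python) =====
-- def count(x):
--     if x>=2000:
--         n=x//2000
--         return f"{n} 2000 notes"+" "+count(x-2000*n)
--     elif x>=500:
--         n=x//500
--         return f"{n} 500 notes"+" "+count(x-500*n)
--     elif x>=200:
--         n=x//200
--         return f"{n} 200 notes"+" "+count(x-200*n)
--     elif x>=100:
--         n=x//100
--         return f"{n} 100 notes"+" "+count(x-100*n)
--     elif x>=50:
--         n=x//50
--         return f"{n} 50 notes"+" "+count(x-50*n)
--     elif x>=20: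
--         n=x//20
--         return f"{n} 20 notes"+" "+count(x-20*n)
--     elif x>=10:
--         n=x//10
--         return f"{n} 10 notes"+" "+count(x-10*n)
--     elif x>=5:
--         n=x//5
--         return f"{n} 5 notes"+" "+count(x-5*n)
--     elif x>=2:
--         n=x//2
--         return f"{n} 2 notes"+" "+count(x-2*n)
--     elif x>=1:
--         n=x//1
--         return f"{n} 1 notes"+" "+count(x-1*n)
--     elif x==0:
--         return ""
--     else:
--         return "invalid"
-- ===== SOURCE B (Python) =====
-- def count(x):
--     s = ""
--     for d in [2000, 500, 200, 100, 50, 20, 10, 5, 2, 1]: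
--         if x >= d:
--             n = x // d
--             s += f"{n} {d} notes "
--             x -= d * n
--     return s if x == 0 else s + "invalid"
-- ===== Notes on version B (the rewrite author's own statement) =====
-- stated objective: simpler
-- what changed: Replaces the ten-branch recursive if/elif cascade with a single loop over a denominations list that builds an accumulator string, with one final invalid check for a non-zero remainder.
import Mathlib
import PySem

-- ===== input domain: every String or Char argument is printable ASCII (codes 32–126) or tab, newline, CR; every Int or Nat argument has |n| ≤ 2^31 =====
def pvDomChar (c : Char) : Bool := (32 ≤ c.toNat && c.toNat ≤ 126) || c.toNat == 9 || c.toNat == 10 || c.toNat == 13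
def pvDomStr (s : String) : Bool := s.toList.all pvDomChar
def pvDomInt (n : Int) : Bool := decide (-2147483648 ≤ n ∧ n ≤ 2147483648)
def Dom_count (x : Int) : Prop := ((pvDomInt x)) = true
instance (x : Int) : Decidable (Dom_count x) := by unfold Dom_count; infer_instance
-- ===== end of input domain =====

-- B replaces A's ten-branch recursive if/elif cascade by a single loop over a list of
-- denominations building an accumulator string (objective: simpler). Same return value on all ints.

-- termination helper for the port of A (cited by decreasing_by)
lemma count_dec (d x : Int) (hd : 0 < d) (hx : d ≤ x) :
    (x - d * PySem.Int.floordiv x d).toNat < x.toNat := by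
  rw [PySem.Int.floordiv_eq_ediv_of_pos hd]
  have h3 := Int.mul_ediv_add_emod x d
  have h4 := Int.emod_nonneg x (by omega : d ≠ 0)
  have h5 := Int.emod_lt_of_pos x hd
  omega

-- ===== PORT A =====
def count (x : Int) : String :=
  if x ≥ 2000 then
    let n := PySem.Int.floordiv x 2000
    PySem.Int.toStr n ++ " 2000 notes" ++ " " ++ count (x - 2000 * n)
  else if x ≥ 500 then
    let n := PySem.Int.floordiv x 500
    PySem.Int.toStr n ++ " 500 notes" ++ " " ++ count (x - 500 * n)
  else if x ≥ 200 then
    let n := PySem.Int.floordiv x 200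
    PySem.Int.toStr n ++ " 200 notes" ++ " " ++ count (x - 200 * n)
  else if x ≥ 100 then
    let n := PySem.Int.floordiv x 100
    PySem.Int.toStr n ++ " 100 notes" ++ " " ++ count (x - 100 * n)
  else if x ≥ 50 then
    let n := PySem.Int.floordiv x 50
    PySem.Int.toStr n ++ " 50 notes" ++ " " ++ count (x - 50 * n)
  else if x ≥ 20 then
    let n := PySem.Int.floordiv x 20
    PySem.Int.toStr n ++ " 20 notes" ++ " " ++ count (x - 20 * n)
  else if x ≥ 10 then
    let n := PySem.Int.floordiv x 10
    PySem.Int.toStr n ++ " 10 notes" ++ " " ++ count (x - 10 * n)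
  else if x ≥ 5 then
    let n := PySem.Int.floordiv x 5
    PySem.Int.toStr n ++ " 5 notes" ++ " " ++ count (x - 5 * n)
  else if x ≥ 2 then
    let n := PySem.Int.floordiv x 2
    PySem.Int.toStr n ++ " 2 notes" ++ " " ++ count (x - 2 * n)
  else if x ≥ 1 then
    let n := PySem.Int.floordiv x 1
    PySem.Int.toStr n ++ " 1 notes" ++ " " ++ count (x - 1 * n)
  else if x = 0 then ""
  else "invalid"
termination_by x.toNat
decreasing_by all_goals exact count_dec _ x (by norm_num) (by omega)

-- ===== PORT B =====
def denoms : List Int := [2000, 500, 200, 100, 50, 20, 10, 5, 2, 1]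

def stepB (st : Int × String) (d : Int) : Int × String :=
  if st.1 ≥ d then
    let n := PySem.Int.floordiv st.1 d
    (st.1 - d * n, st.2 ++ (PySem.Int.toStr n ++ " " ++ PySem.Int.toStr d ++ " notes "))
  else st

def count_alt (x : Int) : String :=
  let st := denoms.foldl stepB (x, "")
  if st.1 = 0 then st.2 else st.2 ++ "invalid"

-- ===== PRECONDITION & SPEC =====
def Spec_count (x : Int) (out : String) : Prop := out = count_alt x
instance (x : Int) (out : String) : Decidable (Spec_count x out) := by unfold Spec_count; infer_instance

-- ===== CLAIM (what is proved, stated in full; the proofs are below) =====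
def Claim_equal_count : Prop := ∀ (x : Int), Dom_count x → Spec_count x (count x)

-- ===== LEMMAS AND PROOFS =====

-- pure (accumulator-free) reading of B's loop: remainder and emitted string
def goB : List Int → Int → Int × String
  | [], x => (x, "")
  | d :: ds, x =>
    if x ≥ d then
      let n := PySem.Int.floordiv x d
      let r := goB ds (x - d * n)
      (r.1, PySem.Int.toStr n ++ " " ++ PySem.Int.toStr d ++ " notes " ++ r.2)
    else goB ds x

lemma goB_skip (d : Int) (ds : List Int) (x : Int) (h : x < d) :
    goB (d :: ds) x = goB ds x := by
  simp only [goB]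
  rw [if_neg (by omega : ¬ x ≥ d)]

lemma goB_hit (d : Int) (ds : List Int) (x : Int) (h : x ≥ d) :
    goB (d :: ds) x = ((goB ds (x - d * PySem.Int.floordiv x d)).1,
      PySem.Int.toStr (PySem.Int.floordiv x d) ++ " " ++ PySem.Int.toStr d ++ " notes " ++
        (goB ds (x - d * PySem.Int.floordiv x d)).2) := by
  simp only [goB]
  rw [if_pos h]

lemma stepB_pos (x : Int) (s : String) (d : Int) (h : x ≥ d) :
    stepB (x, s) d = (x - d * PySem.Int.floordiv x d,
      s ++ (PySem.Int.toStr (PySem.Int.floordiv x d) ++ " " ++ PySem.Int.toStr d ++ " notes ")) := by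
  unfold stepB
  rw [if_pos h]

lemma stepB_neg (x : Int) (s : String) (d : Int) (h : ¬ x ≥ d) :
    stepB (x, s) d = (x, s) := by
  unfold stepB
  rw [if_neg h]

lemma foldl_goB (ds : List Int) (x : Int) (s : String) :
    ds.foldl stepB (x, s) = ((goB ds x).1, s ++ (goB ds x).2) := by
  induction ds generalizing x s with
  | nil => simp [goB]
  | cons d ds ih =>
    by_cases h : x ≥ d
    · rw [List.foldl_cons, goB_hit d ds x h, stepB_pos x s d h, ih]
      rw [String.append_assoc, String.append_assoc, String.append_assoc, String.append_assoc]
    · rw [List.foldl_cons, goB_skip d ds x (by omega), stepB_neg x s d h]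
      exact ih x s

lemma rem_bounds (d x : Int) (hd : 0 < d) (hx : d ≤ x) :
    0 ≤ x - d * PySem.Int.floordiv x d ∧ x - d * PySem.Int.floordiv x d < d := by
  rw [PySem.Int.floordiv_eq_ediv_of_pos hd]
  have h3 := Int.mul_ediv_add_emod x d
  have h4 := Int.emod_nonneg x (by omega : d ≠ 0)
  have h5 := Int.emod_lt_of_pos x hd
  omega

lemma case_str (a w : String) (d : Int) (lit : String)
    (h : lit ++ " " = " " ++ PySem.Int.toStr d ++ " notes ") :
    a ++ lit ++ " " ++ w = a ++ " " ++ PySem.Int.toStr d ++ " notes " ++ w := by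
  have h2 := congrArg (· ++ w) h
  simp only [String.append_assoc] at h2 ⊢
  rw [h2]

lemma main_aux : ∀ (k : Nat) (x : Int), 0 ≤ x → x.toNat = k →
    (goB denoms x).1 = 0 ∧ count x = (goB denoms x).2 := by
  intro k
  induction k using Nat.strong_induction_on with
  | _ k IH =>
    intro x hx hk
    by_cases h2000 : x ≥ 2000
    · have hd : (2000:Int) ≤ x := h2000
      have hb := rem_bounds 2000 x (by norm_num) hd
      have hIH := IH (x - 2000 * PySem.Int.floordiv x 2000).toNat (by omega) _ (by omega) rfl
      have e0 : goB denoms x = goB (2000 :: [500, 200, 100, 50, 20, 10, 5, 2, 1]) x := rfl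
      have e1 := goB_hit 2000 [500, 200, 100, 50, 20, 10, 5, 2, 1] x h2000
      have e2 : goB denoms (x - 2000 * PySem.Int.floordiv x 2000) = goB [500, 200, 100, 50, 20, 10, 5, 2, 1] (x - 2000 * PySem.Int.floordiv x 2000) := by
        rw [denoms, goB_skip _ _ _ (by omega)]
      refine ⟨?_, ?_⟩
      · rw [e0, e1]; rw [← e2]; exact hIH.1
      · unfold count
        rw [if_pos h2000]
        dsimp only
        rw [hIH.2, e2, e0, e1]
        exact case_str (PySem.Int.toStr (PySem.Int.floordiv x 2000)) _ 2000 " 2000 notes" (by decide)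
    ·
      by_cases h500 : x ≥ 500
      · have hd : (500:Int) ≤ x := h500
        have hb := rem_bounds 500 x (by norm_num) hd
        have hIH := IH (x - 500 * PySem.Int.floordiv x 500).toNat (by omega) _ (by omega) rfl
        have e0 : goB denoms x = goB (500 :: [200, 100, 50, 20, 10, 5, 2, 1]) x := by rw [denoms, goB_skip _ _ _ (by omega)]
        have e1 := goB_hit 500 [200, 100, 50, 20, 10, 5, 2, 1] x h500
        have e2 : goB denoms (x - 500 * PySem.Int.floordiv x 500) = goB [200, 100, 50, 20, 10, 5, 2, 1] (x - 500 * PySem.Int.floordiv x 500) := by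
          rw [denoms, goB_skip _ _ _ (by omega), goB_skip _ _ _ (by omega)]
        refine ⟨?_, ?_⟩
        · rw [e0, e1]; rw [← e2]; exact hIH.1
        · unfold count
          rw [if_neg h2000, if_pos h500]
          dsimp only
          rw [hIH.2, e2, e0, e1]
          exact case_str (PySem.Int.toStr (PySem.Int.floordiv x 500)) _ 500 " 500 notes" (by decide)
      ·
        by_cases h200 : x ≥ 200
        · have hd : (200:Int) ≤ x := h200
          have hb := rem_bounds 200 x (by norm_num) hd
          have hIH := IH (x - 200 * PySem.Int.floordiv x 200).toNat (by omega) _ (by omega) rfl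
          have e0 : goB denoms x = goB (200 :: [100, 50, 20, 10, 5, 2, 1]) x := by rw [denoms, goB_skip _ _ _ (by omega), goB_skip _ _ _ (by omega)]
          have e1 := goB_hit 200 [100, 50, 20, 10, 5, 2, 1] x h200
          have e2 : goB denoms (x - 200 * PySem.Int.floordiv x 200) = goB [100, 50, 20, 10, 5, 2, 1] (x - 200 * PySem.Int.floordiv x 200) := by
            rw [denoms, goB_skip _ _ _ (by omega), goB_skip _ _ _ (by omega), goB_skip _ _ _ (by omega)]
          refine ⟨?_, ?_⟩
          · rw [e0, e1]; rw [← e2]; exact hIH.1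
          · unfold count
            rw [if_neg h2000, if_neg h500, if_pos h200]
            dsimp only
            rw [hIH.2, e2, e0, e1]
            exact case_str (PySem.Int.toStr (PySem.Int.floordiv x 200)) _ 200 " 200 notes" (by decide)
        ·
          by_cases h100 : x ≥ 100
          · have hd : (100:Int) ≤ x := h100
            have hb := rem_bounds 100 x (by norm_num) hd
            have hIH := IH (x - 100 * PySem.Int.floordiv x 100).toNat (by omega) _ (by omega) rfl
            have e0 : goB denoms x = goB (100 :: [50, 20, 10, 5, 2, 1]) x := by rw [denoms, goB_skip _ _ _ (by omega), goB_skip _ _ _ (by omega), goB_skip _ _ _ (by omega)]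
            have e1 := goB_hit 100 [50, 20, 10, 5, 2, 1] x h100
            have e2 : goB denoms (x - 100 * PySem.Int.floordiv x 100) = goB [50, 20, 10, 5, 2, 1] (x - 100 * PySem.Int.floordiv x 100) := by
              rw [denoms, goB_skip _ _ _ (by omega), goB_skip _ _ _ (by omega), goB_skip _ _ _ (by omega), goB_skip _ _ _ (by omega)]
            refine ⟨?_, ?_⟩
            · rw [e0, e1]; rw [← e2]; exact hIH.1
            · unfold count
              rw [if_neg h2000, if_neg h500, if_neg h200, if_pos h100]
              dsimp only
              rw [hIH.2, e2, e0, e1]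
              exact case_str (PySem.Int.toStr (PySem.Int.floordiv x 100)) _ 100 " 100 notes" (by decide)
          ·
            by_cases h50 : x ≥ 50
            · have hd : (50:Int) ≤ x := h50
              have hb := rem_bounds 50 x (by norm_num) hd
              have hIH := IH (x - 50 * PySem.Int.floordiv x 50).toNat (by omega) _ (by omega) rfl
              have e0 : goB denoms x = goB (50 :: [20, 10, 5, 2, 1]) x := by rw [denoms, goB_skip _ _ _ (by omega), goB_skip _ _ _ (by omega), goB_skip _ _ _ (by omega), goB_skip _ _ _ (by omega)]
              have e1 := goB_hit 50 [20, 10, 5, 2, 1] x h50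
              have e2 : goB denoms (x - 50 * PySem.Int.floordiv x 50) = goB [20, 10, 5, 2, 1] (x - 50 * PySem.Int.floordiv x 50) := by
                rw [denoms, goB_skip _ _ _ (by omega), goB_skip _ _ _ (by omega), goB_skip _ _ _ (by omega), goB_skip _ _ _ (by omega), goB_skip _ _ _ (by omega)]
              refine ⟨?_, ?_⟩
              · rw [e0, e1]; rw [← e2]; exact hIH.1
              · unfold count
                rw [if_neg h2000, if_neg h500, if_neg h200, if_neg h100, if_pos h50]
                dsimp only
                rw [hIH.2, e2, e0, e1]
                exact case_str (PySem.Int.toStr (PySem.Int.floordiv x 50)) _ 50 " 50 notes" (by decide)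
            ·
              by_cases h20 : x ≥ 20
              · have hd : (20:Int) ≤ x := h20
                have hb := rem_bounds 20 x (by norm_num) hd
                have hIH := IH (x - 20 * PySem.Int.floordiv x 20).toNat (by omega) _ (by omega) rfl
                have e0 : goB denoms x = goB (20 :: [10, 5, 2, 1]) x := by rw [denoms, goB_skip _ _ _ (by omega), goB_skip _ _ _ (by omega), goB_skip _ _ _ (by omega), goB_skip _ _ _ (by omega), goB_skip _ _ _ (by omega)]
                have e1 := goB_hit 20 [10, 5, 2, 1] x h20
                have e2 : goB denoms (x - 20 * PySem.Int.floordiv x 20) = goB [10, 5, 2, 1] (x - 20 * PySem.Int.floordiv x 20) := by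
                  rw [denoms, goB_skip _ _ _ (by omega), goB_skip _ _ _ (by omega), goB_skip _ _ _ (by omega), goB_skip _ _ _ (by omega), goB_skip _ _ _ (by omega), goB_skip _ _ _ (by omega)]
                refine ⟨?_, ?_⟩
                · rw [e0, e1]; rw [← e2]; exact hIH.1
                · unfold count
                  rw [if_neg h2000, if_neg h500, if_neg h200, if_neg h100, if_neg h50, if_pos h20]
                  dsimp only
                  rw [hIH.2, e2, e0, e1]
                  exact case_str (PySem.Int.toStr (PySem.Int.floordiv x 20)) _ 20 " 20 notes" (by decide)
              ·
                by_cases h10 : x ≥ 10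
                · have hd : (10:Int) ≤ x := h10
                  have hb := rem_bounds 10 x (by norm_num) hd
                  have hIH := IH (x - 10 * PySem.Int.floordiv x 10).toNat (by omega) _ (by omega) rfl
                  have e0 : goB denoms x = goB (10 :: [5, 2, 1]) x := by rw [denoms, goB_skip _ _ _ (by omega), goB_skip _ _ _ (by omega), goB_skip _ _ _ (by omega), goB_skip _ _ _ (by omega), goB_skip _ _ _ (by omega), goB_skip _ _ _ (by omega)]
                  have e1 := goB_hit 10 [5, 2, 1] x h10
                  have e2 : goB denoms (x - 10 * PySem.Int.floordiv x 10) = goB [5, 2, 1] (x - 10 * PySem.Int.floordiv x 10) := by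
                    rw [denoms, goB_skip _ _ _ (by omega), goB_skip _ _ _ (by omega), goB_skip _ _ _ (by omega), goB_skip _ _ _ (by omega), goB_skip _ _ _ (by omega), goB_skip _ _ _ (by omega), goB_skip _ _ _ (by omega)]
                  refine ⟨?_, ?_⟩
                  · rw [e0, e1]; rw [← e2]; exact hIH.1
                  · unfold count
                    rw [if_neg h2000, if_neg h500, if_neg h200, if_neg h100, if_neg h50, if_neg h20, if_pos h10]
                    dsimp only
                    rw [hIH.2, e2, e0, e1]
                    exact case_str (PySem.Int.toStr (PySem.Int.floordiv x 10)) _ 10 " 10 notes" (by decide)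
                ·
                  by_cases h5 : x ≥ 5
                  · have hd : (5:Int) ≤ x := h5
                    have hb := rem_bounds 5 x (by norm_num) hd
                    have hIH := IH (x - 5 * PySem.Int.floordiv x 5).toNat (by omega) _ (by omega) rfl
                    have e0 : goB denoms x = goB (5 :: [2, 1]) x := by rw [denoms, goB_skip _ _ _ (by omega), goB_skip _ _ _ (by omega), goB_skip _ _ _ (by omega), goB_skip _ _ _ (by omega), goB_skip _ _ _ (by omega), goB_skip _ _ _ (by omega), goB_skip _ _ _ (by omega)]
                    have e1 := goB_hit 5 [2, 1] x h5
                    have e2 : goB denoms (x - 5 * PySem.Int.floordiv x 5) = goB [2, 1] (x - 5 * PySem.Int.floordiv x 5) := by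
                      rw [denoms, goB_skip _ _ _ (by omega), goB_skip _ _ _ (by omega), goB_skip _ _ _ (by omega), goB_skip _ _ _ (by omega), goB_skip _ _ _ (by omega), goB_skip _ _ _ (by omega), goB_skip _ _ _ (by omega), goB_skip _ _ _ (by omega)]
                    refine ⟨?_, ?_⟩
                    · rw [e0, e1]; rw [← e2]; exact hIH.1
                    · unfold count
                      rw [if_neg h2000, if_neg h500, if_neg h200, if_neg h100, if_neg h50, if_neg h20, if_neg h10, if_pos h5]
                      dsimp only
                      rw [hIH.2, e2, e0, e1]
                      exact case_str (PySem.Int.toStr (PySem.Int.floordiv x 5)) _ 5 " 5 notes" (by decide)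
                  ·
                    by_cases h2 : x ≥ 2
                    · have hd : (2:Int) ≤ x := h2
                      have hb := rem_bounds 2 x (by norm_num) hd
                      have hIH := IH (x - 2 * PySem.Int.floordiv x 2).toNat (by omega) _ (by omega) rfl
                      have e0 : goB denoms x = goB (2 :: [1]) x := by rw [denoms, goB_skip _ _ _ (by omega), goB_skip _ _ _ (by omega), goB_skip _ _ _ (by omega), goB_skip _ _ _ (by omega), goB_skip _ _ _ (by omega), goB_skip _ _ _ (by omega), goB_skip _ _ _ (by omega), goB_skip _ _ _ (by omega)]
                      have e1 := goB_hit 2 [1] x h2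
                      have e2 : goB denoms (x - 2 * PySem.Int.floordiv x 2) = goB [1] (x - 2 * PySem.Int.floordiv x 2) := by
                        rw [denoms, goB_skip _ _ _ (by omega), goB_skip _ _ _ (by omega), goB_skip _ _ _ (by omega), goB_skip _ _ _ (by omega), goB_skip _ _ _ (by omega), goB_skip _ _ _ (by omega), goB_skip _ _ _ (by omega), goB_skip _ _ _ (by omega), goB_skip _ _ _ (by omega)]
                      refine ⟨?_, ?_⟩
                      · rw [e0, e1]; rw [← e2]; exact hIH.1
                      · unfold count
                        rw [if_neg h2000, if_neg h500, if_neg h200, if_neg h100, if_neg h50, if_neg h20, if_neg h10, if_neg h5, if_pos h2]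
                        dsimp only
                        rw [hIH.2, e2, e0, e1]
                        exact case_str (PySem.Int.toStr (PySem.Int.floordiv x 2)) _ 2 " 2 notes" (by decide)
                    ·
                      by_cases h1 : x ≥ 1
                      · have hd : (1:Int) ≤ x := h1
                        have hb := rem_bounds 1 x (by norm_num) hd
                        have hIH := IH (x - 1 * PySem.Int.floordiv x 1).toNat (by omega) _ (by omega) rfl
                        have e0 : goB denoms x = goB (1 :: []) x := by rw [denoms, goB_skip _ _ _ (by omega), goB_skip _ _ _ (by omega), goB_skip _ _ _ (by omega), goB_skip _ _ _ (by omega), goB_skip _ _ _ (by omega), goB_skip _ _ _ (by omega), goB_skip _ _ _ (by omega), goB_skip _ _ _ (by omega), goB_skip _ _ _ (by omega)]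
                        have e1 := goB_hit 1 [] x h1
                        have e2 : goB denoms (x - 1 * PySem.Int.floordiv x 1) = goB [] (x - 1 * PySem.Int.floordiv x 1) := by
                          rw [denoms, goB_skip _ _ _ (by omega), goB_skip _ _ _ (by omega), goB_skip _ _ _ (by omega), goB_skip _ _ _ (by omega), goB_skip _ _ _ (by omega), goB_skip _ _ _ (by omega), goB_skip _ _ _ (by omega), goB_skip _ _ _ (by omega), goB_skip _ _ _ (by omega), goB_skip _ _ _ (by omega)]
                        refine ⟨?_, ?_⟩
                        · rw [e0, e1]; rw [← e2]; exact hIH.1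
                        · unfold count
                          rw [if_neg h2000, if_neg h500, if_neg h200, if_neg h100, if_neg h50, if_neg h20, if_neg h10, if_neg h5, if_neg h2, if_pos h1]
                          dsimp only
                          rw [hIH.2, e2, e0, e1]
                          exact case_str (PySem.Int.toStr (PySem.Int.floordiv x 1)) _ 1 " 1 notes" (by decide)
                      ·
                        have hx0 : x = 0 := by omega
                        subst hx0
                        refine ⟨by decide, ?_⟩
                        unfold count
                        rw [if_neg h2000, if_neg h500, if_neg h200, if_neg h100, if_neg h50, if_neg h20, if_neg h10, if_neg h5, if_neg h2, if_neg h1, if_pos rfl]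
                        decide

lemma goB_neg (x : Int) (h : x < 0) : goB denoms x = (x, "") := by
  rw [denoms]
  rw [goB_skip _ _ _ (by omega : x < 2000)] 
  rw [goB_skip _ _ _ (by omega : x < 500)] 
  rw [goB_skip _ _ _ (by omega : x < 200)] 
  rw [goB_skip _ _ _ (by omega : x < 100)] 
  rw [goB_skip _ _ _ (by omega : x < 50)] 
  rw [goB_skip _ _ _ (by omega : x < 20)] 
  rw [goB_skip _ _ _ (by omega : x < 10)] 
  rw [goB_skip _ _ _ (by omega : x < 5)] 
  rw [goB_skip _ _ _ (by omega : x < 2)] 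
  rw [goB_skip _ _ _ (by omega : x < 1)] 
  simp only [goB]

-- ===== VERDICT (by name: the statement is the Claim_ definition above) =====
theorem count_spec : Claim_equal_count := by
  unfold Claim_equal_count Spec_count
  intro x _
  unfold count_alt
  rw [foldl_goB]
  by_cases hx : 0 ≤ x
  · obtain ⟨h1, h2⟩ := main_aux x.toNat x hx rfl
    rw [h1, if_pos rfl, h2, String.empty_append]
  · have hgo := goB_neg x (by omega)
    rw [hgo]
    dsimp only
    rw [if_neg (by omega : ¬ x = 0)]
    unfold count
    rw [if_neg (by omega : ¬ x ≥ 2000), if_neg (by omega : ¬ x ≥ 500), if_neg (by omega : ¬ x ≥ 200), if_neg (by omega : ¬ x ≥ 100), if_neg (by omega : ¬ x ≥ 50), if_neg (by omega : ¬ x ≥ 20), if_neg (by omega : ¬ x ≥ 10), if_neg (by omega : ¬ x ≥ 5), if_neg (by omega : ¬ x ≥ 2), if_neg (by omega : ¬ x ≥ 1), if_neg (by omega : ¬ x = 0)]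
    decide
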